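-- pv_equiv track=rewrite | github.com/asanth7/CASI_MATS_0_Application | jds_decomposition/question1.py | has_keyboard_walk
-- ===== SOURCE A (Python) =====
-- KEYBOARD_ROWS = [
--     "01234567890",
--     "qwertyuiop",
--     "asdfghjkl",
--     "zxcvbnm",
-- ]
--
-- def has_keyboard_walk(s: str, min_run: int = 4) -> bool:
--     """
--     Detect easy keyboard walks along QWERTY rows (e.g., 'qwer', 'asdf', 'zxcv', '1234').
--     """
--     s_lower = s.lower()
--     if len(s_lower) < min_run:
--         return False
--
--     rows = KEYBOARD_ROWS + [row[::-1] for row in KEYBOARD_ROWS]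
--     for row in rows:
--         if any(s_lower[i : i + min_run] in row for i in range(len(s_lower) - min_run + 1)):
--             return True
--     return False
-- ===== SOURCE B (Python) =====
-- KEYBOARD_ROWS = [
--     "01234567890",
--     "qwertyuiop",
--     "asdfghjkl",
--     "zxcvbnm",
-- ]
--
-- def has_keyboard_walk(s: str, min_run: int = 4) -> bool:
--     """
--     Detect easy keyboard walks along QWERTY rows by precomputing the set of all
--     keyboard-walk windows once, then scanning s in a single pass with O(1) lookups.
--     """
--     s_lower = s.lower()
--     n = len(s_lower)
--     if n < min_run:
--         return False
--     if min_run <= 0: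
--         return True  # a walk of non-positive length is trivially present
--
--     valid = {
--         r[j : j + min_run]
--         for row in KEYBOARD_ROWS
--         for r in (row, row[::-1])
--         for j in range(len(r) - min_run + 1)
--     }
--     if not valid:
--         return False
--     return any(s_lower[i : i + min_run] in valid for i in range(n - min_run + 1))
-- ===== Notes on version B (the rewrite author's own statement) =====
-- stated objective: faster
-- what changed: B precomputes once the set of all length-min_run keyboard-walk windows (from the rows and their reversals), returns False immediately when that table is empty, and otherwise makes a single pass over s with one set lookup per position, instead of A's rescanning s with a substring search once per row.
import Mathlib
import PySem

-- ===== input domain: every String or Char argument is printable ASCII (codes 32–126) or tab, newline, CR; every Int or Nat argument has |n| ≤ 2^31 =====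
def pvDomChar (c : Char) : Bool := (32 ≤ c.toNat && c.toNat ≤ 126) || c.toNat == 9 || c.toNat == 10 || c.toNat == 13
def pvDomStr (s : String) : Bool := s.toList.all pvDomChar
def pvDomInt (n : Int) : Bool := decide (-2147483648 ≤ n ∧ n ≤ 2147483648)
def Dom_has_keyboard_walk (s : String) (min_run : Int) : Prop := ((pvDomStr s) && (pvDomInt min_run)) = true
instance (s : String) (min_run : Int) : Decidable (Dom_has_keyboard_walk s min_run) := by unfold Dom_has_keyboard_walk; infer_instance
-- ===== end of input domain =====

-- B precomputes the set of all length-min_run keyboard-walk windows once and scans s in a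
-- single pass with a set lookup per position, instead of A's substring search of s per row.

-- shared module constant KEYBOARD_ROWS
def pvKeyboardRows : List String := ["01234567890", "qwertyuiop", "asdfghjkl", "zxcvbnm"]

-- row[::-1]; exact: step -1 never raises (PySem.Str.slice?_none_none_neg_one)
def pvRevRow (row : String) : String := (PySem.Str.slice? row none none (-1)).getD ""

-- lazy any(f(i) for i in range(a, b)): Python's generator stops at the first hit, so the
-- port must not materialize range(a, b) (its length is astronomical for min_run < 0)
def pvAnyRange (f : Int → Bool) (a b : Int) : Bool :=
  if a < b then f a || pvAnyRange f (a + 1) b else false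
termination_by (b - a).toNat
decreasing_by omega

-- ===== PORT A =====
def has_keyboard_walk (s : String) (min_run : Int) : Bool :=
  let s_lower := PySem.Str.lower s
  if PySem.Str.len s_lower < min_run then false
  else
    let rows := pvKeyboardRows ++ pvKeyboardRows.map pvRevRow
    rows.any (fun row =>
      pvAnyRange (fun i =>
        PySem.Str.isIn (PySem.Str.slice s_lower (some i) (some (i + min_run))) row)
        0 (PySem.Str.len s_lower - min_run + 1))

-- ===== PORT B =====
def has_keyboard_walk_alt (s : String) (min_run : Int) : Bool :=
  let s_lower := PySem.Str.lower s
  let n := PySem.Str.len s_lower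
  if n < min_run then false
  else if min_run ≤ 0 then true  -- a walk of non-positive length is trivially present
  else
    -- one-time table: every window of length min_run of a row or a reversed row
    let valid : PySem.Set String := PySem.Set.ofList
      (pvKeyboardRows.flatMap (fun row =>
        [row, pvRevRow row].flatMap (fun r =>
          (PySem.List.pyRange 0 (PySem.Str.len r - min_run + 1) 1).map (fun j =>
            PySem.Str.slice r (some j) (some (j + min_run))))))
    if valid.isEmpty then false
    else
      -- single scan of s with a set lookup
      (PySem.List.pyRange 0 (n - min_run + 1) 1).any (fun i =>
        PySem.Set.contains valid (PySem.Str.slice s_lower (some i) (some (i + min_run))))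

-- ===== PRECONDITION & SPEC =====
def Spec_has_keyboard_walk (s : String) (min_run : Int) (out : Bool) : Prop := out = has_keyboard_walk_alt s min_run
instance (s : String) (min_run : Int) (out : Bool) : Decidable (Spec_has_keyboard_walk s min_run out) := by unfold Spec_has_keyboard_walk; infer_instance

-- ===== CLAIM (what is proved, stated in full; the proofs are below) =====
def Claim_equal_has_keyboard_walk : Prop := ∀ (s : String) (min_run : Int), Dom_has_keyboard_walk s min_run → Spec_has_keyboard_walk s min_run (has_keyboard_walk s min_run)

-- ===== LEMMAS AND PROOFS =====

-- the lazy generator 'any' agrees with 'any' over the materialized range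
lemma pvAnyRange_eq (f : Int → Bool) (a b : Int) :
    pvAnyRange f a b = (PySem.List.pyRange a b 1).any f := by
  fun_induction pvAnyRange f a b with
  | case1 a h ih =>
    rw [PySem.List.pyRange_one_cons h, List.any_cons, ih]
  | case2 a h =>
    rw [PySem.List.pyRange_one_eq_nil (by omega), List.any_nil]

-- B's empty-table early exit returns what the scan would: every lookup in an empty set fails
lemma pv_scan_isEmpty (v : List String) (idx : List Int) (f : Int → String) :
    (if v.isEmpty then false else idx.any fun i => PySem.Set.contains v (f i)) =
      idx.any fun i => PySem.Set.contains v (f i) := by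
  by_cases hv : v.isEmpty
  · rw [if_pos hv, List.isEmpty_iff] at *
    symm
    rw [List.any_eq_false]
    intro i _
    rw [PySem.Set.contains_iff, hv]
    simp
  · rw [if_neg hv]

-- the slice t[len(t) : len(t)+m] is empty (used for min_run ≤ 0, where every window is '')
lemma pv_slice_at_len_nil (t : List Char) (m : Int) :
    PySem.List.slice t (some (t.length : Int)) (some ((t.length : Int) + m)) = [] := by
  apply List.eq_nil_of_length_eq_zero
  rw [PySem.List.length_slice]
  have h1 := PySem.List.clampIdx_le t.length ((t.length : Int) + m)
  have h2 : PySem.List.clampIdx t.length ((t.length : Int)) = t.length := by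
    simp
  omega

-- a window slice taken inside the range has length exactly m
lemma pv_length_window (t : List Char) (j m : Int) (h0 : 0 ≤ j) (hm : 0 ≤ m)
    (hle : j + m ≤ (t.length : Int)) :
    ((PySem.List.slice t (some j) (some (j + m))).length : Int) = m := by
  rw [PySem.List.slice_toNat t h0 (by omega)]
  simp only [List.length_take, List.length_drop]
  omega

-- 'w in t' for a window w of length m > 0 ↔ w is one of t's windows of length m
lemma pv_window_iff (t w : List Char) (m : Int) (hw : (w.length : Int) = m) (hm : 0 < m) :
    PySem.Chars.isIn w t = true ↔
      ∃ j, j ∈ PySem.List.pyRange 0 ((t.length : Int) - m + 1) 1 ∧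
        PySem.List.slice t (some j) (some (j + m)) = w := by
  rw [PySem.Chars.isIn_iff_infix]
  constructor
  · rintro ⟨p, q, rfl⟩
    refine ⟨(p.length : Int), ?_, ?_⟩
    · rw [PySem.List.mem_pyRange_one]
      simp only [List.length_append]
      omega
    · rw [PySem.List.slice_toNat _ (by positivity) (by omega)]
      have hdrop : (p ++ (w ++ q)).drop ((p.length : Int)).toNat = w ++ q := by
        simp
      rw [List.append_assoc, hdrop]
      have : (((p.length : Int) + m).toNat - ((p.length : Int)).toNat) = w.length := by omega
      rw [this]
      exact List.take_left
  · rintro ⟨j, hj, hs⟩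
    rw [PySem.List.mem_pyRange_one] at hj
    rw [PySem.List.slice_toNat t hj.1 (by omega)] at hs
    exact hs ▸ ((List.take_prefix _ _).isInfix.trans (List.drop_suffix _ _).isInfix)

-- ===== VERDICT (by name: the statement is the Claim_ definition above) =====
theorem has_keyboard_walk_spec : Claim_equal_has_keyboard_walk := by
  intro s m _
  unfold Spec_has_keyboard_walk has_keyboard_walk has_keyboard_walk_alt
  by_cases hg : PySem.Str.len (PySem.Str.lower s) < m
  · simp only [if_pos hg]
  · simp only [if_neg hg]
    rw [PySem.Str.len_eq] at hg
    by_cases hm : 0 < m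
    · -- positive min_run: both sides name the same window of length m
      rw [if_neg (by omega : ¬ m ≤ 0), pv_scan_isEmpty]
      simp only [pvAnyRange_eq]
      rw [Bool.eq_iff_iff]
      simp only [List.any_eq_true, PySem.Set.contains_iff, PySem.Set.mem_ofList,
        List.mem_flatMap, List.mem_map, List.mem_append, List.mem_cons,
        List.not_mem_nil, or_false, PySem.Str.len_eq]
      constructor
      · rintro ⟨row, hrow, i, hi, hIn⟩
        have hi' := PySem.List.mem_pyRange_one.mp hi
        rw [PySem.Str.isIn_eq] at hIn
        have hlen : (((PySem.Str.slice (PySem.Str.lower s) (some i) (some (i + m))).toList).length : Int) = m := by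
          rw [PySem.Str.toList_slice, PySem.Chars.slice_eq_listSlice]
          exact pv_length_window _ _ _ hi'.1 hm.le (by omega)
        obtain ⟨j, hj, hslice⟩ := (pv_window_iff row.toList _ m hlen hm).mp hIn
        have streq : ∀ r : String, r = row →
            PySem.Str.slice r (some j) (some (j + m)) = PySem.Str.slice (PySem.Str.lower s) (some i) (some (i + m)) := by
          rintro r rfl
          apply String.toList_inj.mp
          rw [PySem.Str.toList_slice, PySem.Chars.slice_eq_listSlice, hslice]
        refine ⟨i, hi, ?_⟩
        rcases hrow with hrow | ⟨a, ha, rfl⟩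
        · exact ⟨row, hrow, row, Or.inl rfl, j, hj, streq row rfl⟩
        · exact ⟨a, ha, pvRevRow a, Or.inr rfl, j, hj, streq _ rfl⟩
      · rintro ⟨i, hi, a, ha, r, hr, j, hj, heq⟩
        have hj' := PySem.List.mem_pyRange_one.mp hj
        have hlen : (((PySem.Str.slice (PySem.Str.lower s) (some i) (some (i + m))).toList).length : Int) = m := by
          rw [← heq, PySem.Str.toList_slice, PySem.Chars.slice_eq_listSlice]
          exact pv_length_window _ _ _ hj'.1 hm.le (by omega)
        have hIn : PySem.Str.isIn (PySem.Str.slice (PySem.Str.lower s) (some i) (some (i + m))) r = true := by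
          rw [PySem.Str.isIn_eq]
          refine (pv_window_iff r.toList _ m hlen hm).mpr ⟨j, hj, ?_⟩
          rw [← PySem.Chars.slice_eq_listSlice, ← PySem.Str.toList_slice, heq]
        refine ⟨r, ?_, i, hi, hIn⟩
        rcases hr with rfl | rfl
        · exact Or.inl ha
        · exact Or.inr ⟨a, ha, rfl⟩
    · -- min_run ≤ 0: B returns True directly, and A finds the empty window at i = len(s)
      rw [if_pos (by omega : m ≤ 0)]
      simp only [pvAnyRange_eq]
      simp only [List.any_eq_true, PySem.Str.len_eq]
      set t := (PySem.Str.lower s).toList with ht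
      have hwin : PySem.Str.slice (PySem.Str.lower s) (some (t.length : Int)) (some ((t.length : Int) + m)) = "" := by
        apply String.toList_inj.mp
        rw [PySem.Str.toList_slice, PySem.Chars.slice_eq_listSlice]
        exact pv_slice_at_len_nil t m
      have hrow0 : ("01234567890" : String) ∈ pvKeyboardRows ++ pvKeyboardRows.map pvRevRow := by
        simp [pvKeyboardRows]
      have hmem : (t.length : Int) ∈ PySem.List.pyRange 0 ((t.length : Int) - m + 1) 1 := by
        rw [PySem.List.mem_pyRange_one]
        omega
      refine ⟨"01234567890", hrow0, (t.length : Int), hmem, ?_⟩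
      rw [PySem.Str.isIn_eq, hwin]
      exact PySem.Chars.isIn_nil _
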